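-- pv_equiv track=rewrite | github.com/XLab-hub/CAUSE | Acc/MobileNetV2/OMP-70_v1.py | cluster_data
-- ===== SOURCE A (Python) =====
-- def cluster_data(train_groups_images, s):
--     n = len(train_groups_images)
--     Z = sum(len(group_images) for group_images in train_groups_images)
--     sorted_groups = sorted(range(n), key=lambda x: len(train_groups_images[x]), reverse=True)
--     shards = [[] for _ in range(s)]
--     shard_sizes = [0] * s
--     for group_idx in sorted_groups:
--         best_shard = min(range(s), key=lambda x: shard_sizes[x])
--         shards[best_shard].append(group_idx)
--         shard_sizes[best_shard] += len(train_groups_images[group_idx])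
--     return shards
-- ===== SOURCE B (Python) =====
-- def _insort(lst, item):
--     i = 0
--     while i < len(lst) and lst[i] < item:
--         i += 1
--     lst.insert(i, item)
--
-- def cluster_data(train_groups_images, s):
--     n = len(train_groups_images)
--     order = sorted(range(n), key=lambda x: len(train_groups_images[x]), reverse=True)
--     shards = [[] for _ in range(s)]
--     loads = [(0, j) for j in range(s)]
--     for g in order:
--         size, j = loads.pop(0)
--         shards[j].append(g)
--         _insort(loads, (size + len(train_groups_images[g]), j))
--     return shards
-- ===== Notes on version B (the rewrite author's own statement) =====
-- stated objective: alternative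
-- what changed: A rescans all s shard sizes with min() for every group; B instead keeps the (load, shard) pairs as a sorted list whose head is always the least-loaded shard, popping the head and re-inserting the updated pair in order.
import Mathlib
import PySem

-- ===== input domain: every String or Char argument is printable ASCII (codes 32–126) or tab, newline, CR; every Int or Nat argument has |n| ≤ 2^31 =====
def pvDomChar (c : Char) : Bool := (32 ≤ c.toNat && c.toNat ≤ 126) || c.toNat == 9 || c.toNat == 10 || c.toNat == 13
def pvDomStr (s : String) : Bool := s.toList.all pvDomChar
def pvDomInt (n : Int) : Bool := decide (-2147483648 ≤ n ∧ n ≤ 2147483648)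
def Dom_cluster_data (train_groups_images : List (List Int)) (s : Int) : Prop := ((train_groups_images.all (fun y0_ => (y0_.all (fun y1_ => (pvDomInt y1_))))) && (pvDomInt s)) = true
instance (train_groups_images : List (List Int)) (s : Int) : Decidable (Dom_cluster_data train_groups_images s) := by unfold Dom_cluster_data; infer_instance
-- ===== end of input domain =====

-- B replaces A's per-group linear argmin scan over all shard sizes by a sorted list of
-- (load, shard) pairs whose head is always the least-loaded shard (objective: alternative).
-- B mutates its loads list in place in Python; the equivalence proved is about the return value.

-- ===== PORT A =====
def cluster_data (train_groups_images : List (List Int)) (s : Int) : List (List Int) :=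
  let n : Int := train_groups_images.length
  let _Z : Int := (train_groups_images.map (fun group_images => (group_images.length : Int))).sum
  let sorted_groups := PySem.List.sorted (PySem.List.pyRange 0 n 1)
      (fun x => ((PySem.List.pyGetD train_groups_images x []).length : Int)) true
  let shards0 : List (List Int) := (PySem.List.pyRange 0 s 1).map (fun _ => [])
  let sizes0 : List Int := List.replicate s.toNat 0
  let fin := sorted_groups.foldl (fun st group_idx =>
    match PySem.List.min? (PySem.List.pyRange 0 s 1) (fun x => PySem.List.pyGetD st.2 x 0) with
    | none => st  -- min() on empty range: Python raises ValueError, excluded by Pre_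
    | some best_shard =>
      (st.1.set best_shard.toNat
         ((PySem.List.pyGetD st.1 best_shard []) ++ [group_idx]),
       st.2.set best_shard.toNat
         ((PySem.List.pyGetD st.2 best_shard 0)
            + ((PySem.List.pyGetD train_groups_images group_idx []).length : Int))))
    (shards0, sizes0)
  fin.1

-- ===== PORT B =====
-- lexicographic tuple comparison (size, idx) < (size', idx'), as Python compares the pairs
def pvLexLt (a b : Int × Int) : Bool := a.1 < b.1 || (a.1 == b.1 && a.2 < b.2)

-- port of Source B's _insort: walk to the first element not < item, insert there
def pvInsort (item : Int × Int) : List (Int × Int) → List (Int × Int)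
  | [] => [item]
  | x :: xs => if pvLexLt x item then x :: pvInsort item xs else item :: x :: xs

def cluster_data_alt (train_groups_images : List (List Int)) (s : Int) : List (List Int) :=
  let n : Int := train_groups_images.length
  let order := PySem.List.sorted (PySem.List.pyRange 0 n 1)
      (fun x => ((PySem.List.pyGetD train_groups_images x []).length : Int)) true
  let shards0 : List (List Int) := (PySem.List.pyRange 0 s 1).map (fun _ => [])
  let loads0 : List (Int × Int) := (PySem.List.pyRange 0 s 1).map (fun j => (0, j))
  let fin := order.foldl (fun st g =>
    match st.2 with
    | [] => st  -- loads.pop(0) on empty: Python raises IndexError, excluded by Pre_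
    | (size, j) :: rest =>
      (st.1.set j.toNat ((PySem.List.pyGetD st.1 j []) ++ [g]),
       pvInsort (size + ((PySem.List.pyGetD train_groups_images g []).length : Int), j) rest))
    (shards0, loads0)
  fin.1

-- ===== PRECONDITION & SPEC =====
-- Pre_ excludes s ≤ 0 with a nonempty group list: there A's min() over the empty shard range
-- raises ValueError (and B's loads.pop(0) raises IndexError).
def Pre_cluster_data (train_groups_images : List (List Int)) (s : Int) : Prop :=
  train_groups_images = [] ∨ 0 < s
instance (train_groups_images : List (List Int)) (s : Int) : Decidable (Pre_cluster_data train_groups_images s) := by unfold Pre_cluster_data; infer_instance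
def pvWitness_cluster_data : List (List Int) × Int := ([[1, 2], [3], [4, 5, 6]], 2)

def Spec_cluster_data (train_groups_images : List (List Int)) (s : Int) (out : List (List Int)) : Prop := out = cluster_data_alt train_groups_images s
instance (train_groups_images : List (List Int)) (s : Int) (out : List (List Int)) : Decidable (Spec_cluster_data train_groups_images s out) := by unfold Spec_cluster_data; infer_instance

-- ===== CLAIM (what is proved, stated in full; the proofs are below) =====
def Claim_equal_cluster_data : Prop := ∀ (train_groups_images : List (List Int)) (s : Int), Dom_cluster_data train_groups_images s → Pre_cluster_data train_groups_images s → Spec_cluster_data train_groups_images s (cluster_data train_groups_images s)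

-- ===== LEMMAS AND PROOFS =====

-- enumerate sizes as (value, index) pairs, value first, starting index i
def pvEnL : List Int → Int → List (Int × Int)
  | [], _ => []
  | a :: t, i => (a, i) :: pvEnL t (i + 1)

theorem pvEnL_length (l : List Int) (i : Int) : (pvEnL l i).length = l.length := by
  induction l generalizing i with
  | nil => rfl
  | cons a t ih => simp [pvEnL, ih]

theorem pvEnL_mem (l : List Int) (i : Int) (p : Int × Int) :
    p ∈ pvEnL l i ↔ ∃ k : Nat, k < l.length ∧ p = (l.getD k 0, i + k) := by
  induction l generalizing i with
  | nil => simp [pvEnL]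
  | cons a t ih =>
    simp only [pvEnL, List.mem_cons, ih]
    constructor
    · rintro (rfl | ⟨k, hk, rfl⟩)
      · exact ⟨0, by simp⟩
      · exact ⟨k + 1, by simpa using hk, by simp; omega⟩
    · rintro ⟨k, hk, rfl⟩
      cases k with
      | zero => left; simp
      | succ k => right; exact ⟨k, by simpa using hk, by simp; omega⟩

theorem pvEnL_getElem (l : List Int) (i : Int) (k : Nat) (hk : k < l.length) :
    (pvEnL l i)[k]'(by rw [pvEnL_length]; exact hk) = (l.getD k 0, i + k) := by
  induction l generalizing i k with
  | nil => simp at hk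
  | cons a t ih =>
    cases k with
    | zero => simp [pvEnL]
    | succ k =>
      have hk' : k < t.length := by simpa using hk
      have := ih (i + 1) k hk'
      simp only [pvEnL, List.getElem_cons_succ, this]
      simp; omega

theorem pvEnL_set (l : List Int) (i : Int) (k : Nat) (v : Int) (hk : k < l.length) :
    pvEnL (l.set k v) i = (pvEnL l i).set k (v, i + k) := by
  induction l generalizing i k with
  | nil => simp at hk
  | cons a t ih =>
    cases k with
    | zero => simp [pvEnL]
    | succ k =>
      have hk' : k < t.length := by simpa using hk
      have h2 : (i + 1) + (k : Int) = i + ((k : Nat) + 1 : Nat) := by push_cast; ring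
      simp only [List.set_cons_succ, pvEnL, ih (i + 1) k hk']
      rw [h2]

theorem pvEnL_snd_ne (l : List Int) (i : Int) (k : Nat) (hk : k < l.length) :
    ∀ y ∈ (pvEnL l i).eraseIdx k, y.2 ≠ i + k := by
  induction l generalizing i k with
  | nil => simp at hk
  | cons a t ih =>
    cases k with
    | zero =>
      intro y hy
      have : y ∈ pvEnL t (i + 1) := by simpa [pvEnL] using hy
      obtain ⟨m, hm, rfl⟩ := (pvEnL_mem t (i + 1) y).1 this
      simp; omega
    | succ k =>
      have hk' : k < t.length := by simpa using hk
      intro y hy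
      rcases (by simpa [pvEnL] using hy : y = (a, i) ∨ y ∈ (pvEnL t (i + 1)).eraseIdx k) with rfl | hy'
      · simp; omega
      · have := ih (i + 1) k hk' y hy'
        omega

theorem pvInsort_perm (x : Int × Int) (l : List (Int × Int)) :
    (pvInsort x l).Perm (x :: l) := by
  induction l with
  | nil => simp [pvInsort]
  | cons y ys ih =>
    by_cases h : pvLexLt y x = true
    · simp only [pvInsort, h, if_pos]
      exact ((ih.cons y).trans (List.Perm.swap x y ys))
    · simp [pvInsort, h]

theorem pvLexLt_trans {a b c : Int × Int} (h1 : pvLexLt a b = true) (h2 : pvLexLt b c = true) :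
    pvLexLt a c = true := by
  simp only [pvLexLt, Bool.or_eq_true, Bool.and_eq_true, decide_eq_true_eq, beq_iff_eq] at *
  omega

theorem pvLexLt_total {a b : Int × Int} (h : ¬ pvLexLt a b = true) (hne : a ≠ b) :
    pvLexLt b a = true := by
  have hne' : a.1 ≠ b.1 ∨ a.2 ≠ b.2 := by
    rcases Decidable.em (a.1 = b.1) with h1 | h1
    · exact Or.inr (fun h2 => hne (Prod.ext h1 h2))
    · exact Or.inl h1
  simp only [pvLexLt, Bool.or_eq_true, Bool.and_eq_true, decide_eq_true_eq, beq_iff_eq] at *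
  omega

theorem pvInsort_mem (x : Int × Int) (l : List (Int × Int)) (y : Int × Int) :
    y ∈ pvInsort x l ↔ y = x ∨ y ∈ l := by
  have := (pvInsort_perm x l).mem_iff (a := y)
  simpa using this

theorem pvInsort_pairwise (x : Int × Int) (l : List (Int × Int))
    (hp : l.Pairwise (fun a b => pvLexLt a b = true))
    (hne : ∀ y ∈ l, y.2 ≠ x.2) :
    (pvInsort x l).Pairwise (fun a b => pvLexLt a b = true) := by
  induction l with
  | nil => simp [pvInsort]
  | cons y ys ih =>
    have hyx : y ≠ x := by
      intro hcon; exact hne y (by simp) (by rw [hcon])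
    rcases List.pairwise_cons.1 hp with ⟨hy, hys⟩
    by_cases h : pvLexLt y x = true
    · simp only [pvInsort, h, if_pos]
      refine List.pairwise_cons.2 ⟨?_, ih hys (fun z hz => hne z (by simp [hz]))⟩
      intro z hz
      rcases (pvInsort_mem x ys z).1 hz with rfl | hz'
      · exact h
      · exact hy z hz'
    · have hxy : pvLexLt x y = true := pvLexLt_total h hyx
      simp only [pvInsort, h, if_neg, Bool.not_eq_true]
      refine List.pairwise_cons.2 ⟨?_, hp⟩
      intro z hz
      rcases List.mem_cons.1 hz with rfl | hz'
      · exact hxy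
      · exact pvLexLt_trans hxy (hy z hz')

theorem perm_set_cons_eraseIdx {α : Type} (l : List α) (k : Nat) (v : α) (hk : k < l.length) :
    (l.set k v).Perm (v :: l.eraseIdx k) := by
  induction l generalizing k with
  | nil => simp at hk
  | cons a t ih =>
    cases k with
    | zero => simp
    | succ k =>
      have hk' : k < t.length := by simpa using hk
      exact ((ih k hk').cons a).trans (List.Perm.swap v a _)

theorem perm_cons_eraseIdx {α : Type} (l : List α) (k : Nat) (hk : k < l.length) :
    l.Perm (l[k] :: l.eraseIdx k) := by
  have h := perm_set_cons_eraseIdx l k (l[k]) hk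
  simpa using h

def pvMinStep {α : Type} (key : α → Int) : Option α → α → Option α :=
  fun acc x => match acc with
  | none => some x
  | some m => if key x < key m then some x else some m

theorem pv_min?_eq_foldl {α : Type} (xs : List α) (key : α → Int) :
    PySem.List.min? xs key = xs.foldl (pvMinStep key) none := rfl

theorem pv_min_fold_keep {α : Type} (key : α → Int) (l : List α) (m : α)
    (h : ∀ x ∈ l, ¬ key x < key m) :
    l.foldl (pvMinStep key) (some m) = some m := by
  induction l with
  | nil => rfl
  | cons x t ih =>
    have hx : ¬ key x < key m := h x (by simp)
    simp only [List.foldl_cons, pvMinStep, hx, if_false]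
    exact ih (fun y hy => h y (by simp [hy]))

theorem pv_min_fold_mem {α : Type} (key : α → Int) (l : List α) (m : α) :
    ∃ m', l.foldl (pvMinStep key) (some m) = some m' ∧ (m' = m ∨ m' ∈ l) := by
  induction l generalizing m with
  | nil => exact ⟨m, rfl, Or.inl rfl⟩
  | cons x t ih =>
    by_cases h : key x < key m
    · obtain ⟨m', hm', hmem⟩ := ih x
      refine ⟨m', ?_, ?_⟩
      · simpa only [List.foldl_cons, pvMinStep, h, if_true] using hm'
      · rcases hmem with rfl | hm
        · simp
        · simp [hm]
    · obtain ⟨m', hm', hmem⟩ := ih m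
      refine ⟨m', ?_, ?_⟩
      · simpa only [List.foldl_cons, pvMinStep, h, if_false] using hm'
      · rcases hmem with rfl | hm
        · simp
        · simp [hm]

theorem pv_min?_first {α : Type} (key : α → Int) (l1 l2 : List α) (j : α)
    (h1 : ∀ x ∈ l1, key j < key x) (h2 : ∀ x ∈ l2, ¬ key x < key j) :
    PySem.List.min? (l1 ++ j :: l2) key = some j := by
  rw [pv_min?_eq_foldl, List.foldl_append]
  cases l1 with
  | nil =>
    show List.foldl (pvMinStep key) (pvMinStep key none j) l2 = some j
    exact pv_min_fold_keep key l2 j h2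
  | cons x t =>
    show List.foldl (pvMinStep key) (List.foldl (pvMinStep key) (pvMinStep key none x) t) (j :: l2) = some j
    obtain ⟨m', hm', hmem⟩ := pv_min_fold_mem key t x
    have hm'mem : m' ∈ x :: t := by
      rcases hmem with rfl | hm
      · simp
      · simp [hm]
    have hj : key j < key m' := h1 m' hm'mem
    show List.foldl (pvMinStep key) (List.foldl (pvMinStep key) (some x) t) (j :: l2) = some j
    rw [hm']
    show List.foldl (pvMinStep key) (pvMinStep key (some m') j) l2 = some j
    simp only [pvMinStep, hj, if_true]
    exact pv_min_fold_keep key l2 j h2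

-- the coupling invariant between A's state (shards, sizes) and B's state (shards, loads)
def pvInv (s : Int) (a : List (List Int) × List Int) (b : List (List Int) × List (Int × Int)) : Prop :=
  a.1 = b.1 ∧ b.2.Perm (pvEnL a.2 0) ∧ b.2.Pairwise (fun x y => pvLexLt x y = true) ∧
    a.2.length = s.toNat

theorem pvEnL_replicate (m : Nat) (i : Int) :
    pvEnL (List.replicate m 0) i = (PySem.List.pyRange i (i + m) 1).map (fun j => ((0 : Int), j)) := by
  induction m generalizing i with
  | zero => simp [pvEnL, PySem.List.pyRange_one_eq_nil (le_refl i)]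
  | succ m ih =>
    have hcons : PySem.List.pyRange i (i + (m + 1 : Nat)) 1
        = i :: PySem.List.pyRange (i + 1) (i + (m + 1 : Nat)) 1 :=
      PySem.List.pyRange_one_cons (by push_cast; omega)
    have harg : i + ((m : Nat) + 1 : Nat) = (i + 1) + (m : Nat) := by push_cast; ring
    rw [List.replicate_succ]
    simp only [pvEnL, ih (i + 1), hcons, List.map_cons]
    rw [harg]

theorem pv_step (tg : List (List Int)) (s : Int) (hs : 0 < s) (g : Int)
    (a : List (List Int) × List Int) (b : List (List Int) × List (Int × Int))
    (h : pvInv s a b) :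
    pvInv s
      (match PySem.List.min? (PySem.List.pyRange 0 s 1) (fun x => PySem.List.pyGetD a.2 x 0) with
       | none => a
       | some best =>
         (a.1.set best.toNat ((PySem.List.pyGetD a.1 best []) ++ [g]),
          a.2.set best.toNat ((PySem.List.pyGetD a.2 best 0)
            + ((PySem.List.pyGetD tg g []).length : Int))))
      (match b.2 with
       | [] => b
       | (size, j) :: rest =>
         (b.1.set j.toNat ((PySem.List.pyGetD b.1 j []) ++ [g]),
          pvInsort (size + ((PySem.List.pyGetD tg g []).length : Int), j) rest)) := by
  obtain ⟨hsh, hperm, hpw, hlen⟩ := h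
  -- b's loads list is nonempty
  have hlenb : b.2.length = a.2.length := by rw [hperm.length_eq, pvEnL_length]
  have hne : b.2 ≠ [] := by
    intro hcon
    rw [hcon] at hlenb
    simp at hlenb
    omega
  obtain ⟨⟨sz, j⟩, rest, hb⟩ : ∃ p rest, b.2 = p :: rest := by
    cases hbb : b.2 with
    | nil => exact absurd hbb hne
    | cons p rest => exact ⟨p, rest, rfl⟩
  -- identify the head as an entry of the enumeration
  have hmemEn : (sz, j) ∈ pvEnL a.2 0 := hperm.mem_iff.1 (by rw [hb]; simp)
  obtain ⟨k, hk, hkeq⟩ := (pvEnL_mem a.2 0 (sz, j)).1 hmemEn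
  have hj : j = (k : Int) := by
    have := congrArg Prod.snd hkeq
    simpa using this
  have hsz : sz = a.2.getD k 0 := by
    have := congrArg Prod.fst hkeq
    simpa using this
  have hj0 : 0 ≤ j := by omega
  have hjs : j < s := by
    have : (k : Int) < (a.2.length : Int) := by exact_mod_cast hk
    omega
  have hjtoNat : j.toNat = k := by omega
  -- every other enumeration entry is lexicographically above the head
  have hrest_lex : ∀ q ∈ rest, pvLexLt (sz, j) q = true := by
    intro q hq
    have := List.pairwise_cons.1 (by rw [hb] at hpw; exact hpw)
    exact this.1 q hq
  have hother : ∀ m : Nat, m < a.2.length → m ≠ k →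
      sz < a.2.getD m 0 ∨ (sz = a.2.getD m 0 ∧ j < (m : Int)) := by
    intro m hm hmk
    have hmem : (a.2.getD m 0, (m : Int)) ∈ b.2 := by
      apply hperm.mem_iff.2
      exact (pvEnL_mem a.2 0 _).2 ⟨m, hm, by simp⟩
    rw [hb] at hmem
    rcases List.mem_cons.1 hmem with heq | hmem'
    · exfalso
      have := congrArg Prod.snd heq
      simp at this
      omega
    · have := hrest_lex _ hmem'
      simp only [pvLexLt, Bool.or_eq_true, Bool.and_eq_true, decide_eq_true_eq, beq_iff_eq] at this
      simpa using this
  -- A's argmin equals the head's shard index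
  have hkeyj : PySem.List.pyGetD a.2 j 0 = sz := by
    rw [PySem.List.pyGetD_of_nonneg _ _ hj0, hjtoNat, hsz]
  have hmin : PySem.List.min? (PySem.List.pyRange 0 s 1) (fun x => PySem.List.pyGetD a.2 x 0)
      = some j := by
    have hsplit : PySem.List.pyRange 0 s 1
        = PySem.List.pyRange 0 j 1 ++ j :: PySem.List.pyRange (j + 1) s 1 := by
      rw [PySem.List.pyRange_one_append 0 j s hj0 (le_of_lt hjs),
        PySem.List.pyRange_one_cons hjs]
    rw [hsplit]
    apply pv_min?_first
    · intro x hx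
      rcases PySem.List.mem_pyRange_one.1 hx with ⟨hx0, hxj⟩
      have hmlt : x.toNat < k := by omega
      have hmlen : x.toNat < a.2.length := by omega
      rcases hother x.toNat hmlen (by omega) with hlt | ⟨_, hgt⟩
      · rw [hkeyj, PySem.List.pyGetD_of_nonneg _ _ hx0]
        exact hlt
      · exfalso; omega
    · intro x hx
      rcases PySem.List.mem_pyRange_one.1 hx with ⟨hx0, hxs⟩
      have hx0' : (0 : Int) ≤ x := by omega
      have hmgt : k < x.toNat := by omega
      have hmlen : x.toNat < a.2.length := by omega
      rcases hother x.toNat hmlen (by omega) with hlt | ⟨heq, _⟩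
      · rw [hkeyj, PySem.List.pyGetD_of_nonneg _ _ hx0']
        omega
      · rw [hkeyj, PySem.List.pyGetD_of_nonneg _ _ hx0']
        omega
  -- both sides take their success branch
  rw [hmin, hb]
  show pvInv s
      (a.1.set j.toNat ((PySem.List.pyGetD a.1 j []) ++ [g]),
       a.2.set j.toNat ((PySem.List.pyGetD a.2 j 0)
         + ((PySem.List.pyGetD tg g []).length : Int)))
      (b.1.set j.toNat ((PySem.List.pyGetD b.1 j []) ++ [g]),
       pvInsort (sz + ((PySem.List.pyGetD tg g []).length : Int), j) rest)
  set L : Int := ((PySem.List.pyGetD tg g []).length : Int) with hL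
  set item : Int × Int := (sz + L, j) with hitem
  have hEnlen : k < (pvEnL a.2 0).length := by rw [pvEnL_length]; exact hk
  have hEnk : (pvEnL a.2 0)[k]'hEnlen = (sz, j) := by
    rw [pvEnL_getElem a.2 0 k hk, ← hkeq]
  have hrest_perm : rest.Perm ((pvEnL a.2 0).eraseIdx k) := by
    have h1 : (pvEnL a.2 0).Perm ((sz, j) :: (pvEnL a.2 0).eraseIdx k) := by
      have := perm_cons_eraseIdx (pvEnL a.2 0) k hEnlen
      rwa [hEnk] at this
    have h2 : ((sz, j) :: rest).Perm ((sz, j) :: (pvEnL a.2 0).eraseIdx k) :=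
      (hb ▸ hperm).trans h1
    exact h2.cons_inv
  have hrest_snd : ∀ y ∈ rest, y.2 ≠ j := by
    intro y hy
    have hy' : y ∈ (pvEnL a.2 0).eraseIdx k := hrest_perm.mem_iff.1 hy
    have := pvEnL_snd_ne a.2 0 k hk y hy'
    omega
  refine ⟨?_, ?_, ?_, ?_⟩
  · -- shards stay equal
    simp only [hsh, hj]
  · -- loads stay a permutation of the enumerated sizes
    have hset : pvEnL (a.2.set j.toNat (PySem.List.pyGetD a.2 j 0 + L)) 0
        = (pvEnL a.2 0).set k (sz + L, (0 : Int) + k) := by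
      rw [hkeyj, hjtoNat, pvEnL_set a.2 0 k (sz + L) hk]
    have hzk : ((0 : Int) + (k : Int)) = j := by omega
    rw [hset, hzk]
    have hP1 : ((pvEnL a.2 0).set k item).Perm (item :: (pvEnL a.2 0).eraseIdx k) :=
      perm_set_cons_eraseIdx _ k item hEnlen
    have hP2 : (item :: (pvEnL a.2 0).eraseIdx k).Perm (item :: rest) :=
      hrest_perm.symm.cons item
    exact (pvInsort_perm item rest).trans (hP1.trans hP2).symm
  · -- loads stay sorted
    apply pvInsort_pairwise
    · rw [hb] at hpw
      exact (List.pairwise_cons.1 hpw).2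
    · intro y hy
      simpa using hrest_snd y hy
  · -- sizes keep length s
    simpa using hlen

theorem pv_couple (tg : List (List Int)) (s : Int) (hs : 0 < s) (gs : List Int)
    (a : List (List Int) × List Int) (b : List (List Int) × List (Int × Int))
    (h : pvInv s a b) :
    pvInv s
      (gs.foldl (fun st group_idx =>
        match PySem.List.min? (PySem.List.pyRange 0 s 1) (fun x => PySem.List.pyGetD st.2 x 0) with
        | none => st
        | some best =>
          (st.1.set best.toNat ((PySem.List.pyGetD st.1 best []) ++ [group_idx]),
           st.2.set best.toNat ((PySem.List.pyGetD st.2 best 0)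
             + ((PySem.List.pyGetD tg group_idx []).length : Int)))) a)
      (gs.foldl (fun st g =>
        match st.2 with
        | [] => st
        | (size, j) :: rest =>
          (st.1.set j.toNat ((PySem.List.pyGetD st.1 j []) ++ [g]),
           pvInsort (size + ((PySem.List.pyGetD tg g []).length : Int), j) rest)) b) := by
  induction gs generalizing a b with
  | nil => exact h
  | cons g gs ih =>
    exact ih _ _ (pv_step tg s hs g a b h)

-- ===== VERDICT (by name: the statement is the Claim_ definition above) =====
theorem cluster_data_spec : Claim_equal_cluster_data := by
  intro tg s _ hpre
  unfold Spec_cluster_data cluster_data cluster_data_alt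
  rcases hpre with hnil | hs
  · subst hnil
    simp [PySem.List.pyRange_one_eq_nil (le_refl (0 : Int)), PySem.List.sorted]
  · have hinv : pvInv s
        ((PySem.List.pyRange 0 s 1).map (fun _ => ([] : List Int)), List.replicate s.toNat (0 : Int))
        ((PySem.List.pyRange 0 s 1).map (fun _ => ([] : List Int)),
         (PySem.List.pyRange 0 s 1).map (fun j => ((0 : Int), j))) := by
      refine ⟨rfl, ?_, ?_, by simp⟩
      · have := pvEnL_replicate s.toNat 0
        rw [this]
        have : (0 : Int) + (s.toNat : Int) = s := by omega
        rw [this]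
      · refine List.Pairwise.map _ ?_ (PySem.List.pairwise_lt_pyRange_one 0 s)
        intro x y hxy
        simp [pvLexLt, hxy]
    have h := pv_couple tg s hs
      (PySem.List.sorted (PySem.List.pyRange 0 (tg.length : Int) 1)
        (fun x => ((PySem.List.pyGetD tg x []).length : Int)) true)
      _ _ hinv
    exact h.1
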